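-- pv_equiv track=rewrite | github.com/Kodsport/doris-2023 | doris-3/sangbok/submissions/accepted/sangbok.py | solve
-- ===== SOURCE A (Python) =====
-- def solve(t, s):
--     s_max = 60*t
--
--     s.sort()
--     sum = 0
--
--     for e in s:
--         sum += e
--
--         if sum > s_max:
--             sum -= e
--             break
--
--     return sum
-- ===== SOURCE B (Python) =====
-- import heapq
--
--
-- def solve(t, s):
--     # Lazy selection with a min-heap instead of a full sort: heapify s in
--     # place, then repeatedly peek at the smallest remaining song and pop it
--     # while it still fits the budget. Stops at the first song that would
--     # push the total over 60*t, exactly like A's break.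
--     # NOTE: mutates s differently from A (heap order, consumed songs popped);
--     # the return value is identical.
--     heapq.heapify(s)
--     budget = 60 * t
--     total = 0
--     while s:
--         e = s[0]
--         if total + e > budget:
--             break
--         total += e
--         heapq.heappop(s)
--     return total
-- ===== Notes on version B (the rewrite author's own statement) =====
-- stated objective: alternative
-- what changed: Replaces sort-then-scan with lazy selection on a min-heap: heapify in O(n), then peek/pop the smallest remaining song until the first one that would exceed the budget, so songs beyond the cut are never ordered.
import Mathlib
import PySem

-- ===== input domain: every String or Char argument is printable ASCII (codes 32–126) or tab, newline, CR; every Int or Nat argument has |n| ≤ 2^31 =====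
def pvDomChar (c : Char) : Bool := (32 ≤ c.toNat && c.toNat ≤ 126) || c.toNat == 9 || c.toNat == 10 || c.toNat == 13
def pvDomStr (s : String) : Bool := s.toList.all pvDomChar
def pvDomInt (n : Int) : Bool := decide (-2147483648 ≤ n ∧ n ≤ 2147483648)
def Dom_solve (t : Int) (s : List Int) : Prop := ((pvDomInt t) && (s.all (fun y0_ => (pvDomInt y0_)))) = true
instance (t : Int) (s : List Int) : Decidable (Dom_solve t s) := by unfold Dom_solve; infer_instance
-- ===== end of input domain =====

-- B replaces A's sort-then-scan with lazy min-heap selection (alternative decomposition);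
-- side effects differ (A sorts s in place, B heapifies and pops the consumed songs from it):
-- the equivalence proved here is about the RETURN value only.

-- ===== PORT A =====
-- the for-loop with break over the sorted list, as structural recursion on the same state
def solveLoop (sMax : Int) : Int → List Int → Int
  | sum, [] => sum
  | sum, e :: rest =>
    let sum' := sum + e
    if sum' > sMax then sum else solveLoop sMax sum' rest

def solve (t : Int) (s : List Int) : Int :=
  let sMax := 60 * t
  solveLoop sMax 0 (PySem.List.sorted s (fun x => x) false)

-- ===== PORT B =====
-- the heap is ported by the contract of heapq (stdlib): the heap holds a multiset of songs,
-- s[0]/heappop peek/remove its minimum; the while-loop becomes recursion on the heap's contents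
def heapLoop (budget : Int) (total : Int) (h : List Int) : Int :=
  match hm : h.min? with
  | none => total            -- heap empty: while-loop ends
  | some e =>                -- e = s[0], the smallest remaining song
    if total + e > budget then total
    else heapLoop budget (total + e) (h.erase e)   -- heappop(s)
termination_by h.length
decreasing_by
  have he : e ∈ h := List.min?_mem hm
  have := List.length_erase_add_one he
  omega

def solve_alt (t : Int) (s : List Int) : Int :=
  heapLoop (60 * t) 0 s

-- ===== PRECONDITION & SPEC =====
def Spec_solve (t : Int) (s : List Int) (out : Int) : Prop := out = solve_alt t s
instance (t : Int) (s : List Int) (out : Int) : Decidable (Spec_solve t s out) := by unfold Spec_solve; infer_instance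

-- ===== CLAIM (what is proved, stated in full; the proofs are below) =====
def Claim_equal_solve : Prop := ∀ (t : Int) (s : List Int), Dom_solve t s → Spec_solve t s (solve t s)

-- ===== LEMMAS AND PROOFS =====
-- sorting puts the minimum first and the sorted remainder after it
theorem sorted_eq_min_cons_sorted_erase (h : List Int) (e : Int) (hm : h.min? = some e) :
    PySem.List.sorted h (fun x => x) false = e :: PySem.List.sorted (h.erase e) (fun x => x) false := by
  have he : e ∈ h := List.min?_mem hm
  refine PySem.List.sorted_id_eq_of_perm_of_pairwise h (e :: PySem.List.sorted (h.erase e) (fun x => x) false) ?_ ?_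
  · exact ((PySem.List.sorted_perm _ _ _).cons e).trans (List.perm_cons_erase he).symm
  · refine List.pairwise_cons.mpr ⟨?_, PySem.List.sorted_pairwise _ _⟩
    intro y hy
    have hy' : y ∈ h := h.mem_of_mem_erase ((PySem.List.mem_sorted _ _ _ _).mp hy)
    exact (List.min?_eq_some_iff.mp hm).2 y hy'

-- popping minima is scanning the sorted list
theorem heapLoop_eq_solveLoop (budget : Int) (h : List Int) :
    ∀ total : Int,
      heapLoop budget total h = solveLoop budget total (PySem.List.sorted h (fun x => x) false) := by
  induction hn : h.length using Nat.strong_induction_on generalizing h with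
  | _ n ih =>
    intro total
    rw [heapLoop]
    match hm : h.min? with
    | none =>
      have : h = [] := List.min?_eq_none_iff.mp hm
      subst this; simp [solveLoop, PySem.List.sorted]
    | some e =>
      rw [sorted_eq_min_cons_sorted_erase h e hm]
      have he : e ∈ h := List.min?_mem hm
      have hlt : (h.erase e).length < n := by
        have := List.length_erase_add_one he; omega
      simp only [solveLoop]
      by_cases hgt : total + e > budget
      · simp [hgt]
      · simp only [hgt, if_false]
        exact ih _ hlt _ rfl _

-- ===== VERDICT (by name: the statement is the Claim_ definition above) =====
theorem solve_spec : Claim_equal_solve := by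
  intro t s _
  unfold Spec_solve solve solve_alt
  exact (heapLoop_eq_solveLoop (60 * t) s 0).symm
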